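-- pv_equiv track=rewrite | github.com/gavinomics/Reversi | DanielAlphaBeta.py | couldBe
-- ===== SOURCE A (Python) =====
-- def couldBe(futureState, row, col, me):
--     for incx in range(-1, 2):
--         for incy in range(-1, 2):
--             if ((incx == 0) and (incy == 0)):
--                 continue
--
--             if (checkDirection(futureState, row, col, incx, incy, me)):
--                 return True
--
--     return False
--
-- def checkDirection(futureState, row, col, incx, incy, me):
--     sequence = []
--     for i in range(1, 8):
--         r = row + incy * i
--         c = col + incx * i
--
--         if ((r < 0) or (r > 7) or (c < 0) or (c > 7)):
--             break
--
--         sequence.append(futureState[r][c])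
--
--     count = 0
--
--     for i in range(len(sequence)):
--         if (me == 1):
--             if (sequence[i] == 2):
--                 count = count + 1
--             else:
--                 if ((sequence[i] == 1) and (count > 0)):
--                     return True
--                 break
--         else:
--             if (sequence[i] == 1):
--                 count = count + 1
--             else:
--                 if ((sequence[i] == 2) and (count > 0)):
--                     return True
--                 break
--
--     return False
-- ===== SOURCE B (Python) =====
-- def couldBe(futureState, row, col, me):
--     opp, win = (2, 1) if me == 1 else (1, 2)
--     return any(
--         _flipsLine(futureState, row, col, incx, incy, opp, win)
--         for incx, incy in ((-1, -1), (-1, 0), (-1, 1), (0, -1), (0, 1), (1, -1), (1, 0), (1, 1))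
--     )
--
-- def _flipsLine(futureState, row, col, incx, incy, opp, win):
--     count = 0
--     for i in range(1, 8):
--         r = row + incy * i
--         c = col + incx * i
--         if r < 0 or r > 7 or c < 0 or c > 7:
--             return False
--         v = futureState[r][c]
--         if v == opp:
--             count += 1
--         else:
--             return v == win and count > 0
--     return False
-- ===== Notes on version B (the rewrite author's own statement) =====
-- stated objective: simpler
-- what changed: checkDirection's build-a-7-cell-list-then-scan pair is replaced by one fused outward walk per direction that stops at the first non-opponent cell, with the opponent/winning values computed once instead of duplicating the me==1/else branches, and the 8 directions are an explicit tuple list fed to any() instead of two nested range(-1,2) loops with a (0,0) skip.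
-- outside the precondition, e.g. on couldBe([[1, 2, 0]], 0, 2, 1): A returns True, B returns True
import Mathlib
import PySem

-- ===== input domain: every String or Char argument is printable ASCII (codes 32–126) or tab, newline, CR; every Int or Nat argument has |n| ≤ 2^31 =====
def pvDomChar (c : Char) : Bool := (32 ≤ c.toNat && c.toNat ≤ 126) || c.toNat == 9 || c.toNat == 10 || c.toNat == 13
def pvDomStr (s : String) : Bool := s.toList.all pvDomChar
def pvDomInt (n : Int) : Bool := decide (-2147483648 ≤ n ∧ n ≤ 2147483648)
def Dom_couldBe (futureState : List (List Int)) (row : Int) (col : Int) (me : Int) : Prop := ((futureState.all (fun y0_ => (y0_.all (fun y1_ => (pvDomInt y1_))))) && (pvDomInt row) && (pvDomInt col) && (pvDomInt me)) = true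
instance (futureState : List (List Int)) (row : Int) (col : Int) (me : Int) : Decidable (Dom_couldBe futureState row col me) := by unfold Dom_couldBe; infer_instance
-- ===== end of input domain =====

-- B fuses A's build-list-then-scan per direction into one early-stopping walk and computes
-- the opponent/winning values once; equivalence of the return value is proved on Pre_.

-- ===== PORT A =====
-- futureState[r][c]; both Pythons index identically, totalized with default 0 (never hit inside Pre_)
def pvLookup (fs : List (List Int)) (r c : Int) : Int :=
  (PySem.List.pyGet? ((PySem.List.pyGet? fs r).getD []) c).getD 0

-- first loop of checkDirection: build 'sequence', breaking at the board boundary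
def pvSeqA (fs : List (List Int)) (row col incx incy : Int) : List Int → List Int
  | [] => []
  | i :: rest =>
    let r := row + incy * i
    let c := col + incx * i
    if r < 0 ∨ r > 7 ∨ c < 0 ∨ c > 7 then []
    else pvLookup fs r c :: pvSeqA fs row col incx incy rest

-- second loop of checkDirection: scan 'sequence' with count, early return / break
def pvScanA (me : Int) : List Int → Int → Bool
  | [], _ => false
  | v :: rest, count =>
    if me = 1 then
      if v = 2 then pvScanA me rest (count + 1)
      else decide (v = 1 ∧ count > 0)
    else
      if v = 1 then pvScanA me rest (count + 1)
      else decide (v = 2 ∧ count > 0)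

def checkDirection (fs : List (List Int)) (row col incx incy me : Int) : Bool :=
  pvScanA me (pvSeqA fs row col incx incy (PySem.List.pyRange 1 8 1)) 0

def couldBe (futureState : List (List Int)) (row : Int) (col : Int) (me : Int) : Bool :=
  (PySem.List.pyRange (-1) 2 1).any fun incx =>
    (PySem.List.pyRange (-1) 2 1).any fun incy =>
      if incx = 0 ∧ incy = 0 then false
      else checkDirection futureState row col incx incy me

-- ===== PORT B =====
-- _flipsLine of Source B: single outward walk, no intermediate list
def pvFlipsLine (fs : List (List Int)) (row col incx incy opp win : Int) : List Int → Int → Bool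
  | [], _ => false
  | i :: rest, count =>
    let r := row + incy * i
    let c := col + incx * i
    if r < 0 ∨ r > 7 ∨ c < 0 ∨ c > 7 then false
    else
      let v := pvLookup fs r c
      if v = opp then pvFlipsLine fs row col incx incy opp win rest (count + 1)
      else decide (v = win ∧ count > 0)

def couldBe_alt (futureState : List (List Int)) (row : Int) (col : Int) (me : Int) : Bool :=
  let p : Int × Int := if me = 1 then (2, 1) else (1, 2)
  ([(-1, -1), (-1, 0), (-1, 1), (0, -1), (0, 1), (1, -1), (1, 0), (1, 1)] : List (Int × Int)).any
    fun d => pvFlipsLine futureState row col d.1 d.2 p.1 p.2 (PySem.List.pyRange 1 8 1) 0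

-- ===== PRECONDITION & SPEC =====
-- Pre_ admits boards with at least 8 rows whose first 8 rows have at least 8 cells (the game's
-- 8×8 boards), plus any input whose coordinates are so far off-board that every direction stops
-- immediately; outside this, A's fixed 0..7 indexing raises IndexError on most inputs, and the
-- few excluded inputs on which A still returns (every walk stops before a missing cell) get the
-- same value from B — see the cite in the claim.
def Pre_couldBe (futureState : List (List Int)) (row : Int) (col : Int) (me : Int) : Prop :=
  (8 ≤ futureState.length ∧ ∀ rw ∈ futureState.take 8, 8 ≤ rw.length)
  ∨ row ≤ -2 ∨ 9 ≤ row ∨ col ≤ -2 ∨ 9 ≤ col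
instance (futureState : List (List Int)) (row : Int) (col : Int) (me : Int) : Decidable (Pre_couldBe futureState row col me) := by unfold Pre_couldBe; infer_instance

def pvWitness_couldBe : List (List Int) × Int × Int × Int :=
  ([[0,0,0,0,0,0,0,0],[0,0,0,0,0,0,0,0],[0,0,0,0,0,0,0,0],[0,0,0,1,2,0,0,0],
    [0,0,0,2,1,0,0,0],[0,0,0,0,0,0,0,0],[0,0,0,0,0,0,0,0],[0,0,0,0,0,0,0,0]], 2, 3, 1)

def Spec_couldBe (futureState : List (List Int)) (row : Int) (col : Int) (me : Int) (out : Bool) : Prop := out = couldBe_alt futureState row col me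
instance (futureState : List (List Int)) (row : Int) (col : Int) (me : Int) (out : Bool) : Decidable (Spec_couldBe futureState row col me out) := by unfold Spec_couldBe; infer_instance

-- ===== CLAIM (what is proved, stated in full; the proofs are below) =====
def Claim_equal_couldBe : Prop := ∀ (futureState : List (List Int)) (row : Int) (col : Int) (me : Int), Dom_couldBe futureState row col me → Pre_couldBe futureState row col me → Spec_couldBe futureState row col me (couldBe futureState row col me)

-- ===== LEMMAS AND PROOFS =====

-- scanning A's built sequence equals B's fused walk (me == 1 case: opp = 2, win = 1)
theorem fuse_one (fs : List (List Int)) (row col incx incy : Int) :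
    ∀ (L : List Int) (n : Int),
      pvScanA 1 (pvSeqA fs row col incx incy L) n = pvFlipsLine fs row col incx incy 2 1 L n := by
  intro L
  induction L with
  | nil => intro n; rfl
  | cons i rest ih =>
    intro n
    simp only [pvSeqA, pvFlipsLine]
    by_cases hb : row + incy * i < 0 ∨ row + incy * i > 7 ∨ col + incx * i < 0 ∨ col + incx * i > 7
    · simp [hb, pvScanA]
    · simp only [hb, if_false]
      by_cases hv : pvLookup fs (row + incy * i) (col + incx * i) = 2
      · simp [pvScanA, hv, ih]
      · simp [pvScanA, hv]

-- the me ≠ 1 case: opp = 1, win = 2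
theorem fuse_other (fs : List (List Int)) (row col incx incy me : Int) (hme : ¬ me = 1) :
    ∀ (L : List Int) (n : Int),
      pvScanA me (pvSeqA fs row col incx incy L) n = pvFlipsLine fs row col incx incy 1 2 L n := by
  intro L
  induction L with
  | nil => intro n; rfl
  | cons i rest ih =>
    intro n
    simp only [pvSeqA, pvFlipsLine]
    by_cases hb : row + incy * i < 0 ∨ row + incy * i > 7 ∨ col + incx * i < 0 ∨ col + incx * i > 7
    · simp [hb, pvScanA]
    · simp only [hb, if_false]
      by_cases hv : pvLookup fs (row + incy * i) (col + incx * i) = 1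
      · simp [pvScanA, hv, hme, ih]
      · simp [pvScanA, hv, hme]

theorem couldBe_eq_alt (fs : List (List Int)) (row col me : Int) :
    couldBe fs row col me = couldBe_alt fs row col me := by
  have hR : PySem.List.pyRange (-1) 2 1 = [-1, 0, 1] := by decide
  unfold couldBe couldBe_alt
  rw [hR]
  by_cases hme : me = 1
  · subst hme
    simp [List.any_cons, checkDirection, fuse_one, Bool.or_assoc]
  · simp [List.any_cons, checkDirection, hme, fuse_other fs row col _ _ me hme, Bool.or_assoc]

-- ===== VERDICT (by name: the statement is the Claim_ definition above) =====
theorem couldBe_spec : Claim_equal_couldBe := by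
  intro fs row col me _ _
  unfold Spec_couldBe
  exact couldBe_eq_alt fs row col me
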